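-- pv_equiv track=rewrite | github.com/seanco-hash/AMD_prediction | datasets/preprocess_new.py | get_folds_mid_values
-- ===== SOURCE A (Python) =====
-- def get_folds_mid_values(x, y, kp_num, cols_num):
--     # Divde the image cols space to folds
--     folds_num = int(cols_num // 100) + 1
--     mid_values = [[] for i in range(folds_num)]
--
--     # Add for each fold the row values that related to it
--     for i in range(kp_num):
--         ind = int(x[i] // 100)
--         mid_values[ind].append(y[i])
--         if (x[i] % 100 >= 90 and ind < folds_num - 1):
--             mid_values[ind+1].append(y[i])
--         elif(x[i] % 100 <= 10) and ind > 0: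
--             mid_values[ind-1].append(y[i])
--
--     # Calculate the mid value in the fold
--     for i in range(folds_num):
--         if mid_values[i]:
--             mid_values[i] = (max(mid_values[i]) + (sum(mid_values[i]) // len(mid_values[i]))) // 2
--         else:
--             mid_values[i] = 0
--
--     # Check if the last fold contains outliers
--     if abs(mid_values[-1] - mid_values[-2]) > 15:
--         mid_values[-1] = 0
--
--     return mid_values
-- ===== SOURCE B (Python) =====
-- def get_folds_mid_values(x, y, kp_num, cols_num):
--     # Transposed traversal: for each fold, gather its contributing row values
--     # by a filter over the keypoints, then reduce; same binning rules as the spec.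
--     folds_num = cols_num // 100 + 1
--
--     def contributes(xi, j):
--         ind = xi // 100
--         return (j == ind
--                 or (xi % 100 >= 90 and ind < folds_num - 1 and j == ind + 1)
--                 or (xi % 100 <= 10 and ind > 0 and j == ind - 1))
--
--     mids = []
--     for j in range(folds_num):
--         vals = [y[i] for i in range(kp_num) if contributes(x[i], j)]
--         mids.append((max(vals) + sum(vals) // len(vals)) // 2 if vals else 0)
--
--     if abs(mids[-1] - mids[-2]) > 15:
--         mids[-1] = 0
--     return mids
-- ===== Notes on version B (the rewrite author's own statement) =====
-- stated objective: alternative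
-- what changed: B transposes the traversal: instead of distributing keypoints into per-fold bucket lists in one mutating pass and then reducing each bucket, it computes each fold's value directly by filtering the keypoints with a membership predicate, one fold at a time.
-- outside the precondition, e.g. on get_folds_mid_values([-5], [7], 1, 100): A returns [7, 7], B returns [7, 0]
import Mathlib
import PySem

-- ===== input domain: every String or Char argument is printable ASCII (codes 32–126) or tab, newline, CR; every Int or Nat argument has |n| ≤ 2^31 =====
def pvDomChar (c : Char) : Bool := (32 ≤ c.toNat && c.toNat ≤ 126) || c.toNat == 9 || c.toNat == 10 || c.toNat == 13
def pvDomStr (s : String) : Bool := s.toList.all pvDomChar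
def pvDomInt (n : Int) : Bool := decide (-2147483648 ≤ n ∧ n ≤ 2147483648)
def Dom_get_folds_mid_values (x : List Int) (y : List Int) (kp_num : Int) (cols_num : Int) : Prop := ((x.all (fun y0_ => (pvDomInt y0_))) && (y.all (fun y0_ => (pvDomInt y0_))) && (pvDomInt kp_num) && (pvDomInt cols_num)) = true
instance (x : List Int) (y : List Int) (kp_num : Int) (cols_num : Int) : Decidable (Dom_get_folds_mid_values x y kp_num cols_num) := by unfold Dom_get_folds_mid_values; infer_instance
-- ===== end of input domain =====

-- B transposes the traversal: instead of distributing keypoints into per-fold bucket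
-- lists in one pass, it scans the keypoints once per fold with a membership predicate
-- and reduces directly (objective: alternative, same result, no speed claim).

-- ===== PORT A =====
-- per-fold reduction '(max(l) + sum(l)//len(l)) // 2 if l else 0' (shared by both
-- Pythons verbatim; max(l) = PySem.List.max?, empty list gives the else-branch 0)
def pvFoldVal (l : List Int) : Int :=
  match PySem.List.max? l (fun v => v) with
  | none => 0
  | some m => PySem.Int.floordiv (m + PySem.Int.floordiv l.sum (l.length : Int)) 2

-- body of A's 'for i in range(kp_num)' loop, step for step
def pvStepA (folds_num : Int) (x y : List Int) (m : List (List Int)) (i : Int) : List (List Int) :=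
  let xi := PySem.List.pyGetD x i 0
  let yi := PySem.List.pyGetD y i 0
  let ind := PySem.Int.floordiv xi 100
  let m := PySem.List.pySetD m ind (PySem.List.pyGetD m ind [] ++ [yi])
  if 90 ≤ PySem.Int.mod xi 100 ∧ ind < folds_num - 1 then
    PySem.List.pySetD m (ind + 1) (PySem.List.pyGetD m (ind + 1) [] ++ [yi])
  else if PySem.Int.mod xi 100 ≤ 10 ∧ 0 < ind then
    PySem.List.pySetD m (ind - 1) (PySem.List.pyGetD m (ind - 1) [] ++ [yi])
  else m

def get_folds_mid_values (x : List Int) (y : List Int) (kp_num : Int) (cols_num : Int) : List Int :=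
  let folds_num : Int := PySem.Int.floordiv cols_num 100 + 1
  let mid_values : List (List Int) := (PySem.List.pyRange 0 folds_num 1).map (fun _ => ([] : List Int))
  let mid_values := (PySem.List.pyRange 0 kp_num 1).foldl (pvStepA folds_num x y) mid_values
  let mids : List Int := mid_values.map pvFoldVal
  if 15 < |PySem.List.pyGetD mids (-1) 0 - PySem.List.pyGetD mids (-2) 0| then
    PySem.List.pySetD mids (-1) 0
  else mids

-- ===== PORT B =====
-- B's 'contributes(xi, j)' helper
def pvContributes (folds_num xi j : Int) : Bool :=
  let ind := PySem.Int.floordiv xi 100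
  j == ind
  || (decide (90 ≤ PySem.Int.mod xi 100) && decide (ind < folds_num - 1) && j == ind + 1)
  || (decide (PySem.Int.mod xi 100 ≤ 10) && decide (0 < ind) && j == ind - 1)

def get_folds_mid_values_alt (x : List Int) (y : List Int) (kp_num : Int) (cols_num : Int) : List Int :=
  let folds_num : Int := PySem.Int.floordiv cols_num 100 + 1
  let mids : List Int := (PySem.List.pyRange 0 folds_num 1).map (fun j =>
    let vals := ((PySem.List.pyRange 0 kp_num 1).filter
        (fun i => pvContributes folds_num (PySem.List.pyGetD x i 0) j)).map
        (fun i => PySem.List.pyGetD y i 0)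
    pvFoldVal vals)
  if 15 < |PySem.List.pyGetD mids (-1) 0 - PySem.List.pyGetD mids (-2) 0| then
    PySem.List.pySetD mids (-1) 0
  else mids

-- ===== PRECONDITION & SPEC =====
-- Pre_ excludes the inputs on which A raises (kp_num beyond either list's length,
-- cols_num < 100 which makes mid_values[-2] an IndexError, a keypoint column beyond
-- the folds) and keypoints with x outside [0, cols_num], on which A's negative-index
-- wraparound bins a value into the trailing folds by accident.
def Pre_get_folds_mid_values (x : List Int) (y : List Int) (kp_num : Int) (cols_num : Int) : Prop :=
  kp_num ≤ (x.length : Int) ∧ kp_num ≤ (y.length : Int) ∧ 100 ≤ cols_num ∧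
  ∀ xi ∈ x.take kp_num.toNat, 0 ≤ xi ∧ xi / 100 ≤ cols_num / 100
instance (x : List Int) (y : List Int) (kp_num : Int) (cols_num : Int) : Decidable (Pre_get_folds_mid_values x y kp_num cols_num) := by unfold Pre_get_folds_mid_values; infer_instance

def pvWitness_get_folds_mid_values : List Int × List Int × Int × Int := ([5, 95, 150], [10, 20, 30], 3, 200)

def Spec_get_folds_mid_values (x : List Int) (y : List Int) (kp_num : Int) (cols_num : Int) (out : List Int) : Prop := out = get_folds_mid_values_alt x y kp_num cols_num
instance (x : List Int) (y : List Int) (kp_num : Int) (cols_num : Int) (out : List Int) : Decidable (Spec_get_folds_mid_values x y kp_num cols_num out) := by unfold Spec_get_folds_mid_values; infer_instance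

-- ===== CLAIM (what is proved, stated in full; the proofs are below) =====
def Claim_equal_get_folds_mid_values : Prop := ∀ (x : List Int) (y : List Int) (kp_num : Int) (cols_num : Int), Dom_get_folds_mid_values x y kp_num cols_num → Pre_get_folds_mid_values x y kp_num cols_num → Spec_get_folds_mid_values x y kp_num cols_num (get_folds_mid_values x y kp_num cols_num)

-- ===== LEMMAS AND PROOFS =====

theorem pvStepA_length (folds_num : Int) (x y : List Int) (m : List (List Int)) (i : Int) :
    (pvStepA folds_num x y m i).length = m.length := by
  unfold pvStepA
  dsimp only
  split_ifs <;> simp [PySem.List.length_pySetD]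

set_option maxRecDepth 8000 in
theorem pvStepA_get (folds_num : Int) (x y : List Int) (m : List (List Int)) (i : Int)
    (hlen : (m.length : Int) = folds_num)
    (hxi : 0 ≤ PySem.List.pyGetD x i 0 ∧
           PySem.Int.floordiv (PySem.List.pyGetD x i 0) 100 < folds_num)
    (j : Nat) (hj : j < m.length) :
    PySem.List.pyGetD (pvStepA folds_num x y m i) (j : Int) [] =
      PySem.List.pyGetD m (j : Int) [] ++
        (if pvContributes folds_num (PySem.List.pyGetD x i 0) (j : Int)
         then [PySem.List.pyGetD y i 0] else []) := by
  obtain ⟨hx0, hxlt⟩ := hxi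
  unfold pvStepA pvContributes
  dsimp only
  revert hx0 hxlt
  generalize PySem.List.pyGetD y i 0 = yi
  generalize PySem.List.pyGetD x i 0 = xi
  intro hx0 hxlt
  obtain ⟨n, hn⟩ : ∃ n : ℕ, PySem.Int.floordiv xi 100 = (n : Int) :=
    ⟨(PySem.Int.floordiv xi 100).toNat, by
      rw [PySem.Int.floordiv_eq_ediv_of_pos (by norm_num : (0:Int) < 100)]
      exact (Int.toNat_of_nonneg (Int.ediv_nonneg hx0 (by norm_num))).symm⟩
  rw [hn] at hxlt ⊢
  have hnm : n < m.length := by omega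
  generalize PySem.Int.mod xi 100 = r
  by_cases h1 : 90 ≤ r ∧ (n : Int) < folds_num - 1
  · rw [if_pos h1]
    simp only [show ((n : Int) + 1) = (((n + 1 : Nat)) : Int) from by push_cast; ring]
    obtain ⟨h1a, h1b⟩ := h1
    have hn1 : n + 1 < m.length := by omega
    have hmod : ¬ r ≤ 10 := by omega
    simp only [PySem.List.pySetD_natCast, PySem.List.pyGetD_natCast,
      List.getD_eq_getElem?_getD, List.getElem?_set, List.length_set]
    simp only [h1a, h1b, hmod, decide_true, decide_false, beq_iff_eq, Nat.cast_inj,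
      Bool.true_and, Bool.and_true, Bool.and_false, Bool.false_and,
      Bool.false_or, Bool.or_false]
    split_ifs
    all_goals try first | omega | (subst_vars; simp)
    all_goals simp_all only [Bool.not_eq_true, Bool.or_eq_false_iff, Bool.and_eq_false_iff, beq_eq_false_iff_ne, ne_eq, beq_iff_eq, Bool.or_eq_true, Bool.and_eq_true, decide_eq_true_eq, Nat.cast_inj, eq_self_iff_true, or_true, true_or, not_true, not_or] <;> omega
  · rw [if_neg h1]
    by_cases h2 : r ≤ 10 ∧ 0 < (n : Int)
    · rw [if_pos h2]
      obtain ⟨h2a, h2b⟩ := h2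
      simp only [show ((n : Int) - 1) = (((n - 1 : Nat)) : Int) from by
        have : 1 ≤ n := by omega
        push_cast [this]; ring]
      have hmod : ¬ 90 ≤ r := by omega
      simp only [PySem.List.pySetD_natCast, PySem.List.pyGetD_natCast,
        List.getD_eq_getElem?_getD, List.getElem?_set, List.length_set]
      simp only [h2a, h2b, hmod, decide_true, decide_false, beq_iff_eq, Nat.cast_inj,
        Bool.true_and, Bool.and_true, Bool.and_false, Bool.false_and,
        Bool.false_or, Bool.or_false]
      split_ifs
      all_goals try first | omega | (subst_vars; simp)
      all_goals simp_all only [Bool.not_eq_true, Bool.or_eq_false_iff, Bool.and_eq_false_iff, beq_eq_false_iff_ne, ne_eq, beq_iff_eq, Bool.or_eq_true, Bool.and_eq_true, decide_eq_true_eq, Nat.cast_inj, eq_self_iff_true, or_true, true_or, not_true, not_or] <;> omega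
    · rw [if_neg h2]
      simp only [PySem.List.pySetD_natCast, PySem.List.pyGetD_natCast,
        List.getD_eq_getElem?_getD, List.getElem?_set, List.length_set]
      rcases not_and_or.mp h1 with h | h <;> rcases not_and_or.mp h2 with h' | h' <;>
      · simp only [h, h', decide_false, beq_iff_eq, Nat.cast_inj,
          Bool.false_and, Bool.and_false, Bool.true_and, Bool.and_true,
          Bool.false_or, Bool.or_false]
        split_ifs
        all_goals try first | omega | (subst_vars; simp)
        all_goals simp_all only [Bool.not_eq_true, Bool.or_eq_false_iff, Bool.and_eq_false_iff, beq_eq_false_iff_ne, ne_eq, beq_iff_eq, Bool.or_eq_true, Bool.and_eq_true, decide_eq_true_eq, Nat.cast_inj, eq_self_iff_true, or_true, true_or, not_true, not_or] <;> omega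

theorem pv_bucket (folds_num : Int) (x y : List Int) (L : List Int) (m : List (List Int))
    (hlen : (m.length : Int) = folds_num)
    (hL : ∀ i ∈ L, 0 ≤ PySem.List.pyGetD x i 0 ∧
          PySem.Int.floordiv (PySem.List.pyGetD x i 0) 100 < folds_num)
    (j : Nat) (hj : j < m.length) :
    PySem.List.pyGetD (L.foldl (pvStepA folds_num x y) m) (j : Int) [] =
      PySem.List.pyGetD m (j : Int) [] ++ ((L.filter (fun i => pvContributes folds_num (PySem.List.pyGetD x i 0) (j : Int))).map
                  (fun i => PySem.List.pyGetD y i 0)) := by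
  induction L generalizing m with
  | nil => simp
  | cons a t ih =>
    have ha := hL a (by simp)
    have h1 := pvStepA_get folds_num x y m a hlen ha j hj
    have hl := pvStepA_length folds_num x y m a
    rw [List.foldl_cons, ih (pvStepA folds_num x y m a) (by rw [hl]; exact hlen)
        (fun i hi => hL i (by simp [hi])) (by omega), h1, List.filter_cons]
    split <;> simp_all

theorem pv_foldl_length (folds_num : Int) (x y : List Int) (L : List Int) (m : List (List Int)) :
    (L.foldl (pvStepA folds_num x y) m).length = m.length := by
  induction L generalizing m with
  | nil => rfl
  | cons a t ih => rw [List.foldl_cons, ih, pvStepA_length]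

-- ===== VERDICT (by name: the statement is the Claim_ definition above) =====
theorem get_folds_mid_values_spec : Claim_equal_get_folds_mid_values := by
  intro x y kp_num cols_num _ hpre
  obtain ⟨hkx, hky, hcols, hxs⟩ := hpre
  unfold Spec_get_folds_mid_values get_folds_mid_values get_folds_mid_values_alt
  dsimp only
  have hfd : PySem.Int.floordiv cols_num 100 = cols_num / 100 :=
    PySem.Int.floordiv_eq_ediv_of_pos (by norm_num)
  set F := PySem.Int.floordiv cols_num 100 + 1 with hF
  have hF2 : 2 ≤ F := by rw [hF, hfd]; omega
  have hinitlen : (((PySem.List.pyRange 0 F 1).map (fun _ => ([] : List Int))).length : Int) = F := by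
    simp [PySem.List.length_pyRange_one]; omega
  have hL : ∀ i ∈ PySem.List.pyRange 0 kp_num 1, 0 ≤ PySem.List.pyGetD x i 0 ∧
      PySem.Int.floordiv (PySem.List.pyGetD x i 0) 100 < F := by
    intro i hi
    rw [PySem.List.mem_pyRange_one] at hi
    obtain ⟨k, rfl⟩ : ∃ k : ℕ, i = (k : ℤ) := ⟨i.toNat, by omega⟩
    have hix : k < x.length := by omega
    have hxi : PySem.List.pyGetD x (k : ℤ) 0 = x[k] := by
      rw [PySem.List.pyGetD_natCast]
      exact List.getD_eq_getElem _ _ hix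
    have h1 : k < (x.take kp_num.toNat).length := by
      simp only [List.length_take]; omega
    have hmem : x[k] ∈ x.take kp_num.toNat := by
      have h2 := List.getElem_mem h1
      simpa using h2
    obtain ⟨hx0, hdiv⟩ := hxs _ hmem
    refine ⟨by rw [hxi]; exact hx0, ?_⟩
    rw [hxi, PySem.Int.floordiv_eq_ediv_of_pos (by norm_num : (0:Int) < 100), hF, hfd]
    omega
  have hMeq : (((PySem.List.pyRange 0 kp_num 1).foldl (pvStepA F x y)
        ((PySem.List.pyRange 0 F 1).map (fun _ => ([] : List Int)))).map pvFoldVal)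
      = (PySem.List.pyRange 0 F 1).map (fun j => pvFoldVal
          (((PySem.List.pyRange 0 kp_num 1).filter
              (fun i => pvContributes F (PySem.List.pyGetD x i 0) j)).map
            (fun i => PySem.List.pyGetD y i 0))) := by
    apply List.ext_getElem
    · simp only [List.length_map, pv_foldl_length]
    · intro j hj1 hj2
      have hjM : j < (((PySem.List.pyRange 0 kp_num 1).foldl (pvStepA F x y)
          ((PySem.List.pyRange 0 F 1).map (fun _ => ([] : List Int)))).length) := by
        simpa using hj1
      have hjinit : j < ((PySem.List.pyRange 0 F 1).map (fun _ => ([] : List Int))).length := by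
        rw [← pv_foldl_length F x y (PySem.List.pyRange 0 kp_num 1)]; exact hjM
      have hb := pv_bucket F x y (PySem.List.pyRange 0 kp_num 1)
        ((PySem.List.pyRange 0 F 1).map (fun _ => ([] : List Int))) hinitlen hL j hjinit
      simp only [List.getElem_map]
      congr 1
      have hgA : PySem.List.pyGetD ((PySem.List.pyRange 0 kp_num 1).foldl (pvStepA F x y)
          ((PySem.List.pyRange 0 F 1).map (fun _ => ([] : List Int)))) (j : Int) []
          = ((PySem.List.pyRange 0 kp_num 1).foldl (pvStepA F x y)
          ((PySem.List.pyRange 0 F 1).map (fun _ => ([] : List Int))))[j] := by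
        rw [PySem.List.pyGetD_natCast]
        exact List.getD_eq_getElem _ _ hjM
      have hgI : PySem.List.pyGetD ((PySem.List.pyRange 0 F 1).map (fun _ => ([] : List Int)))
          (j : Int) [] = [] := by
        rw [PySem.List.pyGetD_natCast]
        rw [List.getD_eq_getElem _ _ hjinit]
        simp
      rw [hgA, hgI] at hb
      rw [hb, List.nil_append]
      have hjlen : j < (PySem.List.pyRange 0 F 1).length := by
        simpa only [List.length_map] using hj2
      have hjr : (PySem.List.pyRange 0 F 1)[j]'hjlen = (0 : Int) + (j : Int) :=
        PySem.List.getElem_pyRange_one 0 F j hjlen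
      rw [hjr, zero_add]
  rw [hMeq]
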